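-- pv_equiv track=rewrite | github.com/XAIHT/Tlamatini | Tlamatini/agent/agents/flowhypervisor/flowhypervisor.py | build_connection_matrix
-- ===== SOURCE A (Python) =====
-- from typing import Dict, List
--
-- def build_connection_matrix(agents: List[str], configs: Dict[str, Dict]) -> List[List[int]]:
--     """Build an NxN connection matrix. matrix[row][col] = 1 means agent[row] outputs to agent[col].
--     Rows represent agent outputs; columns represent agent inputs.
--     """
--     n = len(agents)
--     matrix = [[0] * n for _ in range(n)]
--     agent_index = {name: i for i, name in enumerate(agents)}
--
--     for agent_name, config in configs.items():
--         row = agent_index.get(agent_name)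
--         if row is None:
--             continue
--
--         # Collect all outgoing connections from this agent's config
--         targets = set()
--
--         # target_agents — most agents
--         for t in config.get('target_agents', []):
--             targets.add(t)
--
--         # output_agents — Ender, Stopper, Cleaner
--         for t in config.get('output_agents', []):
--             targets.add(t)
--
--         # target_agents_a / target_agents_b — Asker, Forker
--         for t in config.get('target_agents_a', []):
--             targets.add(t)
--         for t in config.get('target_agents_b', []):
--             targets.add(t)
--
--         for target_name in targets:
--             col = agent_index.get(target_name)
--             if col is not None:
--                 matrix[row][col] = 1
--
--     return matrix
-- ===== SOURCE B (Python) =====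
-- def build_connection_matrix(agents, configs):
--     """Build the NxN connection matrix row by row: each agent's row is
--     constructed densely from the column indices its own config targets."""
--     index = {name: i for i, name in enumerate(agents)}
--     n = len(agents)
--     keys = ('target_agents', 'output_agents', 'target_agents_a', 'target_agents_b')
--     matrix = []
--     for name in agents:
--         config = configs.get(name)
--         if config is None:
--             matrix.append([0] * n)
--             continue
--         cols = {index[t] for key in keys for t in config.get(key, []) if t in index}
--         matrix.append([1 if j in cols else 0 for j in range(n)])
--     return matrix
-- ===== Notes on version B (the rewrite author's own statement) =====
-- stated objective: idiomatic
-- what changed: B builds each agent's row densely in one pass over all n columns from that agent's own config (configs.get per row), instead of A's pre-zeroed matrix with scatter-assignment of 1s driven by iterating over configs.items() and a collected target set.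
import Mathlib
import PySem

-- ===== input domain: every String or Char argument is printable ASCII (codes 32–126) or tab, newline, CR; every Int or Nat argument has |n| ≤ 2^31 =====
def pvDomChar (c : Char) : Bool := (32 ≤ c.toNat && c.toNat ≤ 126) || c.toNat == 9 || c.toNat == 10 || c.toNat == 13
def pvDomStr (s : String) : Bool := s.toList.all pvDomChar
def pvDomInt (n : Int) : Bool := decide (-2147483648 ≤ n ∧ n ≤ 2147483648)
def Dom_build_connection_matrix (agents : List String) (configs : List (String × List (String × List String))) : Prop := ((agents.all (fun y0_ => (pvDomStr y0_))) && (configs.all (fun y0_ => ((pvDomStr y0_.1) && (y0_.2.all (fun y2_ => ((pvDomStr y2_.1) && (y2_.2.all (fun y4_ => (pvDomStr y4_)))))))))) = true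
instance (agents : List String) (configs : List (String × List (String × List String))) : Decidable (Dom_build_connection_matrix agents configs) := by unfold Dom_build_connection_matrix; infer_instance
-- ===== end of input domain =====

-- B builds the matrix row by row (each agent's row constructed densely from its own config) instead
-- of scatter-assigning 1s into a pre-zeroed matrix per config entry; same cost class, no speed claim.

-- ===== PORT A =====
-- {name: i for i, name in enumerate(agents)}
def pvAgentIndex (agents : List String) : PySem.Dict String Int :=
  (PySem.List.enumerate agents).foldl (fun d p => d.insert p.2 p.1) PySem.Dict.empty

-- body of A's inner loop: 'for target_name in targets: … matrix[row][col] = 1'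
def pvScatter (agent_index : PySem.Dict String Int) (row : Int)
    (m : List (List Int)) (target_name : String) : List (List Int) :=
  match agent_index.get? target_name with
  | none => m
  | some col => m.set row.toNat ((m.getD row.toNat []).set col.toNat 1)

-- body of A's outer loop: process one (agent_name, config) item of configs
def pvStepA (agent_index : PySem.Dict String Int) (matrix : List (List Int))
    (pr : String × List (String × List String)) : List (List Int) :=
  match agent_index.get? pr.1 with
  | none => matrix
  | some row =>
    let config := PySem.Dict.mk pr.2
    let targets : PySem.Set String := PySem.Set.empty
    let targets := (config.getD "target_agents" ([] : List String)).foldl (fun s t => PySem.Set.add s t) targets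
    let targets := (config.getD "output_agents" ([] : List String)).foldl (fun s t => PySem.Set.add s t) targets
    let targets := (config.getD "target_agents_a" ([] : List String)).foldl (fun s t => PySem.Set.add s t) targets
    let targets := (config.getD "target_agents_b" ([] : List String)).foldl (fun s t => PySem.Set.add s t) targets
    targets.foldl (pvScatter agent_index row) matrix

def build_connection_matrix (agents : List String) (configs : List (String × List (String × List String))) : List (List Int) :=
  let n := agents.length
  let matrix : List (List Int) := (PySem.List.pyRange 0 (n : Int) 1).map (fun _ => List.replicate n (0 : Int))
  let agent_index := pvAgentIndex agents
  configs.foldl (pvStepA agent_index) matrix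

-- ===== PORT B =====
def pvConnKeys : List String := ["target_agents", "output_agents", "target_agents_a", "target_agents_b"]

-- one row of B's matrix: dense construction from the agent's own config
def pvRowB (index : PySem.Dict String Int) (n : Nat)
    (configs : List (String × List (String × List String))) (name : String) : List Int :=
  match (PySem.Dict.mk configs).get? name with
  | none => List.replicate n (0 : Int)
  | some config =>
    let cfg := PySem.Dict.mk config
    let cols : PySem.Set Int :=
      PySem.Set.ofList ((pvConnKeys.flatMap (fun key => cfg.getD key [])).filterMap (fun t => index.get? t))
    (List.range n).map (fun (j : Nat) => if PySem.Set.contains cols ((j : Int)) then (1 : Int) else 0)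

def build_connection_matrix_alt (agents : List String) (configs : List (String × List (String × List String))) : List (List Int) :=
  let index : PySem.Dict String Int :=
    (PySem.List.enumerate agents).foldl (fun d p => d.insert p.2 p.1) PySem.Dict.empty
  agents.map (pvRowB index agents.length configs)

-- ===== PRECONDITION & SPEC =====
-- Pre_ excludes duplicate agent names, on which A fills only the row of a name's LAST occurrence
-- (its index dict keeps the last index) while B fills the row of every occurrence — an accidental
-- last-wins corner no caller would specify; duplicate keys in the configs association list are
-- excluded because a Python dict cannot carry them (the Python function never receives such input).
def Pre_build_connection_matrix (agents : List String) (configs : List (String × List (String × List String))) : Prop :=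
  agents.Nodup ∧ (configs.map Prod.fst).Nodup

instance (agents : List String) (configs : List (String × List (String × List String))) : Decidable (Pre_build_connection_matrix agents configs) := by unfold Pre_build_connection_matrix; infer_instance

def pvWitness_build_connection_matrix : List String × (List (String × List (String × List String))) :=
  (["a", "b"], [("a", [("target_agents", ["b"])])])

def Spec_build_connection_matrix (agents : List String) (configs : List (String × List (String × List String))) (out : List (List Int)) : Prop := out = build_connection_matrix_alt agents configs
instance (agents : List String) (configs : List (String × List (String × List String))) (out : List (List Int)) : Decidable (Spec_build_connection_matrix agents configs out) := by unfold Spec_build_connection_matrix; infer_instance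

-- ===== CLAIM (what is proved, stated in full; the proofs are below) =====
def Claim_equal_build_connection_matrix : Prop := ∀ (agents : List String) (configs : List (String × List (String × List String))), Dom_build_connection_matrix agents configs → Pre_build_connection_matrix agents configs → Spec_build_connection_matrix agents configs (build_connection_matrix agents configs)

-- ===== LEMMAS AND PROOFS =====

-- the combined target list a config contributes (both ports read the same four keys)
def pvCombined (cfg : List (String × List String)) : List String :=
  pvConnKeys.flatMap (fun key => (PySem.Dict.mk cfg).getD key [])

-- characterisation of the index dict built from enumerate (Nodup source)
theorem pvIdx_fold_get (xs : List String) (s : Int) (d : PySem.Dict String Int) (name : String)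
    (h : xs.Nodup) :
    ((PySem.List.enumerate xs s).foldl (fun d p => d.insert p.2 p.1) d).get? name =
      if name ∈ xs then some (s + (xs.idxOf name : Int)) else d.get? name := by
  induction xs generalizing s d with
  | nil => simp
  | cons x xs ih =>
    rw [PySem.List.enumerate_cons]
    simp only [List.foldl_cons]
    rw [ih _ _ h.of_cons]
    by_cases hx : name = x
    · subst hx
      have hnx : name ∉ xs := (List.nodup_cons.mp h).1
      simp [hnx, PySem.Dict.get?_insert_self, List.idxOf_cons_self]
    · by_cases hmem : name ∈ xs
      · simp only [hmem, if_true, List.mem_cons, hx, false_or]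
        rw [List.idxOf_cons_ne _ (fun he => hx he.symm)]
        push_cast
        congr 1
        omega
      · have hno : ¬ name ∈ (x :: xs) := by simp [hx, hmem]
        simp [hmem, hno, PySem.Dict.get?_insert_of_ne _ _ hx]

theorem pvAgentIndex_get (agents : List String) (h : agents.Nodup) (name : String) :
    (pvAgentIndex agents).get? name =
      if name ∈ agents then some ((agents.idxOf name : Nat) : Int) else none := by
  unfold pvAgentIndex
  rw [pvIdx_fold_get _ _ _ _ h]
  simp

theorem pvAgentIndex_get_iff (agents : List String) (h : agents.Nodup) (t : String) (j : Nat)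
    (hj : j < agents.length) :
    (pvAgentIndex agents).get? t = some ((j : Nat) : Int) ↔ t = agents[j] := by
  rw [pvAgentIndex_get _ h]
  constructor
  · intro hg
    by_cases hm : t ∈ agents
    · simp only [hm, if_true] at hg
      have hidx : agents.idxOf t = j := by exact_mod_cast Option.some.inj hg
      subst hidx
      exact (List.getElem_idxOf (by omega)).symm
    · simp [hm] at hg
  · intro ht
    subst ht
    simp [List.getElem_mem, h.idxOf_getElem j hj]

-- entry accessor used throughout the proofs
def pvE (m : List (List Int)) (i j : Nat) : Int := (m.getD i []).getD j 0

-- shape predicate: an n × n matrix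
def pvShape (n : Nat) (m : List (List Int)) : Prop :=
  m.length = n ∧ ∀ row ∈ m, row.length = n

theorem pvE_set (m : List (List Int)) (r c : Nat) (i j : Nat) (hr : r < m.length)
    (hc : c < (m.getD r []).length) :
    pvE (m.set r ((m.getD r []).set c 1)) i j =
      if i = r ∧ j = c then 1 else pvE m i j := by
  unfold pvE
  rcases Nat.lt_or_ge i m.length with him | him
  · rw [List.getD_eq_getElem (m.set r ((m.getD r []).set c 1)) [] (by simpa using him),
      List.getD_eq_getElem m [] him]
    by_cases hir : i = r
    · subst hir
      rw [List.getElem_set_self]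
      have hRow : m.getD i [] = m[i] := List.getD_eq_getElem m [] him
      rw [hRow] at hc ⊢
      rcases Nat.lt_or_ge j m[i].length with hj | hj
      · rw [List.getD_eq_getElem (m[i].set c 1) 0 (by simpa using hj),
          List.getD_eq_getElem m[i] 0 hj]
        by_cases hjc : j = c
        · subst hjc
          rw [List.getElem_set_self]
          simp
        · rw [List.getElem_set_ne (by omega)]
          simp [hjc]
      · rw [List.getD_eq_default (m[i].set c 1) 0 (by simpa using hj),
          List.getD_eq_default m[i] 0 hj]
        have : j ≠ c := by omega
        simp [this]
    · rw [List.getElem_set_ne (by omega)]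
      simp [hir]
  · rw [List.getD_eq_default (m.set r ((m.getD r []).set c 1)) [] (by simpa using him),
      List.getD_eq_default m [] him]
    have : i ≠ r := by omega
    simp [this]

theorem pvShape_set (n : Nat) (m : List (List Int)) (r c : Nat) (hr : r < m.length) (h : pvShape n m) :
    pvShape n (m.set r ((m.getD r []).set c 1)) := by
  obtain ⟨hl, hrow⟩ := h
  refine ⟨by simpa using hl, ?_⟩
  intro row hm
  rcases List.mem_or_eq_of_mem_set hm with h1 | h1
  · exact hrow _ h1
  · subst h1
    simp only [List.length_set]
    exact hrow _ (List.getD_eq_getElem m [] hr ▸ m.getElem_mem hr)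

-- the inner loop of A: scattering the targets of one config into row `row`
theorem pvInner_fold (agents : List String) (h : agents.Nodup) (row : Int)
    (hr : row.toNat < agents.length) (ts : List String) (m : List (List Int))
    (hm : pvShape agents.length m) :
    pvShape agents.length (ts.foldl (pvScatter (pvAgentIndex agents) row) m) ∧
    ∀ i j, (hi : i < agents.length) → (hj : j < agents.length) →
      pvE (ts.foldl (pvScatter (pvAgentIndex agents) row) m) i j =
      if i = row.toNat ∧ agents[j] ∈ ts then 1 else pvE m i j := by
  induction ts generalizing m with
  | nil => exact ⟨hm, by intro i j _ _; simp⟩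
  | cons t ts ih =>
    simp only [List.foldl_cons]
    have hstep : pvShape agents.length (pvScatter (pvAgentIndex agents) row m t) ∧
        ∀ i j, (hi : i < agents.length) → (hj : j < agents.length) →
          pvE (pvScatter (pvAgentIndex agents) row m t) i j =
          if i = row.toNat ∧ t = agents[j] then 1 else pvE m i j := by
      unfold pvScatter
      rcases hg : (pvAgentIndex agents).get? t with _ | col
      · refine ⟨hm, ?_⟩
        intro i j hi hj
        have hne : ¬ (t = agents[j]) := by
          intro he
          rw [(pvAgentIndex_get_iff agents h t j hj).2 he] at hg
          simp at hg
        simp [hne]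
      · have hmem : t ∈ agents := by
          rw [pvAgentIndex_get agents h] at hg
          by_cases hmem : t ∈ agents
          · exact hmem
          · simp [hmem] at hg
        have hcol : col = ((agents.idxOf t : Nat) : Int) := by
          rw [pvAgentIndex_get agents h, if_pos hmem] at hg
          exact (Option.some.inj hg).symm
        have hclt : col.toNat < agents.length := by
          rw [hcol]
          simpa using List.idxOf_lt_length_of_mem hmem
        have hrm : row.toNat < m.length := hm.1 ▸ hr
        have hcrow : col.toNat < (m.getD row.toNat []).length := by
          have := hm.2 (m.getD row.toNat []) (List.getD_eq_getElem m [] hrm ▸ m.getElem_mem hrm)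
          omega
        refine ⟨pvShape_set _ _ _ _ hrm hm, ?_⟩
        intro i j hi hj
        rw [pvE_set m row.toNat col.toNat i j hrm hcrow]
        have hiff : (j = col.toNat) ↔ (t = agents[j]) := by
          constructor
          · intro hj'
            have hsome : (pvAgentIndex agents).get? t = some ((j : Nat) : Int) := by
              rw [pvAgentIndex_get agents h, if_pos hmem]
              congr 1
              omega
            exact (pvAgentIndex_get_iff agents h t j hj).1 hsome
          · intro ht
            have hsome := (pvAgentIndex_get_iff agents h t j hj).2 ht
            rw [pvAgentIndex_get agents h, if_pos hmem] at hsome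
            have h2 : ((agents.idxOf t : Nat) : Int) = (j : Int) := Option.some.inj hsome
            omega
        simp only [hiff]
    obtain ⟨hsh, hent⟩ := hstep
    obtain ⟨hsh2, hent2⟩ := ih _ hsh
    refine ⟨hsh2, ?_⟩
    intro i j hi hj
    rw [hent2 i j hi hj, hent i j hi hj]
    by_cases hir : i = row.toNat
    · subst hir
      by_cases h1 : agents[j] ∈ ts
      · simp [h1]
      · by_cases h2 : t = agents[j] <;> simp [h1, h2, eq_comm]
    · simp [hir]

-- A's targets set for one config (the zeta-reduced let-chain of pvStepA)
def pvTargetsA (cfg : List (String × List String)) : PySem.Set String :=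
  ((PySem.Dict.mk cfg).getD "target_agents_b" ([] : List String)).foldl (fun s t => PySem.Set.add s t)
    (((PySem.Dict.mk cfg).getD "target_agents_a" ([] : List String)).foldl (fun s t => PySem.Set.add s t)
      (((PySem.Dict.mk cfg).getD "output_agents" ([] : List String)).foldl (fun s t => PySem.Set.add s t)
        (((PySem.Dict.mk cfg).getD "target_agents" ([] : List String)).foldl (fun s t => PySem.Set.add s t)
          PySem.Set.empty)))

theorem pvTargetsA_mem (cfg : List (String × List String)) (x : String) :
    x ∈ pvTargetsA cfg ↔ x ∈ pvCombined cfg := by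
  show x ∈ ((((PySem.Set.empty.update
      ((PySem.Dict.mk cfg).getD "target_agents" ([] : List String))).update
      ((PySem.Dict.mk cfg).getD "output_agents" ([] : List String))).update
      ((PySem.Dict.mk cfg).getD "target_agents_a" ([] : List String))).update
      ((PySem.Dict.mk cfg).getD "target_agents_b" ([] : List String))) ↔ x ∈ pvCombined cfg
  simp [pvCombined, pvConnKeys, PySem.Set.mem_update, List.flatMap_cons, or_assoc]

-- the outer loop of A over the configs
theorem pvOuter_fold (agents : List String) (h : agents.Nodup)
    (cs : List (String × List (String × List String))) (m : List (List Int))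
    (hm : pvShape agents.length m) :
    pvShape agents.length (cs.foldl (pvStepA (pvAgentIndex agents)) m) ∧
    ∀ i j, (hi : i < agents.length) → (hj : j < agents.length) →
      pvE (cs.foldl (pvStepA (pvAgentIndex agents)) m) i j =
      if ∃ p ∈ cs, p.1 = agents[i] ∧ agents[j] ∈ pvCombined p.2 then 1 else pvE m i j := by
  induction cs generalizing m with
  | nil => exact ⟨hm, by intro i j _ _; simp⟩
  | cons p cs ih =>
    simp only [List.foldl_cons]
    have hstep : pvShape agents.length (pvStepA (pvAgentIndex agents) m p) ∧
        ∀ i j, (hi : i < agents.length) → (hj : j < agents.length) →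
          pvE (pvStepA (pvAgentIndex agents) m p) i j =
          if p.1 = agents[i] ∧ agents[j] ∈ pvCombined p.2 then 1 else pvE m i j := by
      rcases hg : (pvAgentIndex agents).get? p.1 with _ | row
      · have hid : pvStepA (pvAgentIndex agents) m p = m := by
          unfold pvStepA
          rw [hg]
        rw [hid]
        refine ⟨hm, ?_⟩
        intro i j hi hj
        have hne : ¬ (p.1 = agents[i]) := by
          intro he
          rw [(pvAgentIndex_get_iff agents h p.1 i hi).2 he] at hg
          simp at hg
        simp [hne]
      · have hmem : p.1 ∈ agents := by
          rw [pvAgentIndex_get agents h] at hg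
          by_cases hmem : p.1 ∈ agents
          · exact hmem
          · simp [hmem] at hg
        have hrow : row = ((agents.idxOf p.1 : Nat) : Int) := by
          rw [pvAgentIndex_get agents h, if_pos hmem] at hg
          exact (Option.some.inj hg).symm
        have hrlt : row.toNat < agents.length := by
          rw [hrow]
          simpa using List.idxOf_lt_length_of_mem hmem
        have hstepEq : pvStepA (pvAgentIndex agents) m p =
            (pvTargetsA p.2).foldl (pvScatter (pvAgentIndex agents) row) m := by
          unfold pvStepA
          rw [hg]
          rfl
        rw [hstepEq]
        obtain ⟨hsh, hent⟩ := pvInner_fold agents h row hrlt (pvTargetsA p.2) m hm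
        refine ⟨hsh, ?_⟩
        intro i j hi hj
        rw [hent i j hi hj]
        have hiff : (i = row.toNat) ↔ (p.1 = agents[i]) := by
          constructor
          · intro hi'
            have hsome : (pvAgentIndex agents).get? p.1 = some ((i : Nat) : Int) := by
              rw [pvAgentIndex_get agents h, if_pos hmem]
              congr 1
              omega
            exact (pvAgentIndex_get_iff agents h p.1 i hi).1 hsome
          · intro hp
            have hsome := (pvAgentIndex_get_iff agents h p.1 i hi).2 hp
            rw [pvAgentIndex_get agents h, if_pos hmem] at hsome
            have h2 : ((agents.idxOf p.1 : Nat) : Int) = (i : Int) := Option.some.inj hsome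
            omega
        simp only [hiff, pvTargetsA_mem]
    obtain ⟨hsh, hent⟩ := hstep
    obtain ⟨hsh2, hent2⟩ := ih _ hsh
    refine ⟨hsh2, ?_⟩
    intro i j hi hj
    rw [hent2 i j hi hj, hent i j hi hj]
    by_cases h1 : ∃ q ∈ cs, q.1 = agents[i] ∧ agents[j] ∈ pvCombined q.2
    · simp [h1]
    · by_cases h2 : p.1 = agents[i] ∧ agents[j] ∈ pvCombined p.2 <;> simp [h1, h2]

-- first-match lookup in the configs dict with unique keys: found ↔ the unique matching entry
theorem pvConfigs_get_none (configs : List (String × List (String × List String)))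
    (name : String) (hnone : (PySem.Dict.mk configs).get? name = none) :
    ∀ p ∈ configs, p.1 ≠ name := by
  induction configs with
  | nil => simp
  | cons q cs ih =>
    rw [show (PySem.Dict.mk (q :: cs)) = PySem.Dict.mk ((q.1, q.2) :: cs) by simp] at hnone
    rw [PySem.Dict.get?_mk_cons] at hnone
    by_cases he : q.1 = name
    · simp [he] at hnone
    · simp only [beq_iff_eq, he, if_false] at hnone
      intro p hp
      rcases List.mem_cons.mp hp with h1 | h1
      · rw [h1]; simpa using he
      · exact ih hnone p h1

theorem pvConfigs_get_some (configs : List (String × List (String × List String)))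
    (hc : (configs.map Prod.fst).Nodup) (name : String)
    (cfg : List (String × List String)) (hsome : (PySem.Dict.mk configs).get? name = some cfg) :
    ∀ p ∈ configs, p.1 = name → p.2 = cfg := by
  induction configs with
  | nil => simp
  | cons q cs ih =>
    have hc' : q.1 ∉ cs.map Prod.fst ∧ (cs.map Prod.fst).Nodup := by
      rw [List.map_cons, List.nodup_cons] at hc
      exact hc
    obtain ⟨hq, hcs⟩ := hc'
    rw [show (PySem.Dict.mk (q :: cs)) = PySem.Dict.mk ((q.1, q.2) :: cs) by simp] at hsome
    rw [PySem.Dict.get?_mk_cons] at hsome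
    intro p hp hpe
    by_cases he : q.1 = name
    · simp only [beq_iff_eq, he, if_pos] at hsome
      have hcfg : q.2 = cfg := Option.some.inj hsome
      rcases List.mem_cons.mp hp with h1 | h1
      · rw [h1]; exact hcfg
      · exact absurd (by simpa [hpe, ← he] using List.mem_map_of_mem (f := Prod.fst) h1) hq
    · simp only [beq_iff_eq, he, if_false] at hsome
      rcases List.mem_cons.mp hp with h1 | h1
      · exact absurd (h1 ▸ hpe) he
      · exact ih hcs hsome p h1 hpe

-- B's membership test over the columns set, reduced to membership in the combined list
theorem pvCols_contains (agents : List String) (h : agents.Nodup)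
    (cfg : List (String × List String)) (j : Nat) (hj : j < agents.length) :
    PySem.Set.contains (PySem.Set.ofList ((pvCombined cfg).filterMap
      (fun t => (pvAgentIndex agents).get? t))) ((j : Nat) : Int) =
    decide (agents[j] ∈ pvCombined cfg) := by
  by_cases hmem : agents[j] ∈ pvCombined cfg
  · have hin : ((j : Nat) : Int) ∈ (pvCombined cfg).filterMap (fun t => (pvAgentIndex agents).get? t) := by
      rw [List.mem_filterMap]
      exact ⟨agents[j], hmem, (pvAgentIndex_get_iff agents h _ j hj).2 rfl⟩
    have hct := (PySem.Set.contains_iff _ _).2 ((PySem.Set.mem_ofList _ _).2 hin)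
    rw [hct]
    simp [hmem]
  · have hnin : ((j : Nat) : Int) ∉ (pvCombined cfg).filterMap (fun t => (pvAgentIndex agents).get? t) := by
      rw [List.mem_filterMap]
      rintro ⟨t, ht, hg⟩
      exact hmem (((pvAgentIndex_get_iff agents h t j hj).1 hg) ▸ ht)
    have hct : ¬ (PySem.Set.contains (PySem.Set.ofList ((pvCombined cfg).filterMap
        (fun t => (pvAgentIndex agents).get? t))) ((j : Nat) : Int) = true) := fun hcc =>
      hnin ((PySem.Set.mem_ofList _ _).1 ((PySem.Set.contains_iff _ _).1 hcc))
    rw [Bool.not_eq_true] at hct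
    rw [hct]
    simp [hmem]

-- pvE over a mapped row list
theorem pvE_map (f : String → List Int) (agents : List String) (i j : Nat)
    (hi : i < agents.length) :
    pvE (agents.map f) i j = (f agents[i]).getD j 0 := by
  unfold pvE
  rw [List.getD_eq_getElem (agents.map f) [] (by simpa using hi), List.getElem_map]

-- B's entries
theorem pvAlt_entry (agents : List String) (h : agents.Nodup)
    (configs : List (String × List (String × List String))) (i j : Nat)
    (hi : i < agents.length) (hj : j < agents.length) :
    pvE (build_connection_matrix_alt agents configs) i j =
      match (PySem.Dict.mk configs).get? agents[i] with
      | none => 0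
      | some cfg => if agents[j] ∈ pvCombined cfg then 1 else 0 := by
  unfold build_connection_matrix_alt
  have hIdx : ((PySem.List.enumerate agents).foldl (fun d p => d.insert p.2 p.1) PySem.Dict.empty) =
      pvAgentIndex agents := rfl
  rw [hIdx, pvE_map _ agents i j hi]
  unfold pvRowB
  rcases hg : (PySem.Dict.mk configs).get? agents[i] with _ | cfg
  · simp
  · have hcb : (pvConnKeys.flatMap (fun key => (PySem.Dict.mk cfg).getD key ([] : List String))) =
        pvCombined cfg := rfl
    simp only [hcb]
    rw [List.getD_eq_getElem ((List.range agents.length).map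
        (fun (j : Nat) => if PySem.Set.contains (PySem.Set.ofList ((pvCombined cfg).filterMap
          (fun t => (pvAgentIndex agents).get? t))) ((j : Int)) then (1 : Int) else 0)) 0
        (by simpa using hj), List.getElem_map, List.getElem_range,
      pvCols_contains agents h cfg j hj]
    by_cases hmem : agents[j] ∈ pvCombined cfg <;> simp [hmem]

theorem pvAlt_shape (agents : List String)
    (configs : List (String × List (String × List String))) :
    pvShape agents.length (build_connection_matrix_alt agents configs) := by
  unfold build_connection_matrix_alt
  refine ⟨by simp, ?_⟩
  intro row hrow
  rw [List.mem_map] at hrow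
  obtain ⟨name, _, hrw⟩ := hrow
  subst hrw
  unfold pvRowB
  rcases (PySem.Dict.mk configs).get? name with _ | cfg <;> simp

-- A's initial zero matrix
theorem pvInit_shape (n : Nat) :
    pvShape n ((PySem.List.pyRange 0 (n : Int) 1).map (fun _ => List.replicate n (0 : Int))) := by
  refine ⟨by simp [PySem.List.length_pyRange_one], ?_⟩
  intro row hrow
  rw [List.mem_map] at hrow
  obtain ⟨_, _, hr⟩ := hrow
  subst hr
  simp

theorem pvInit_entry (n : Nat) (i j : Nat) :
    pvE ((PySem.List.pyRange 0 (n : Int) 1).map (fun _ => List.replicate n (0 : Int))) i j = 0 := by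
  unfold pvE
  have hlen : ((PySem.List.pyRange 0 (n : Int) 1).map (fun _ => List.replicate n (0 : Int))).length = n := by
    simp [PySem.List.length_pyRange_one]
  rcases Nat.lt_or_ge i n with him | him
  · rw [List.getD_eq_getElem ((PySem.List.pyRange 0 (n : Int) 1).map
      (fun _ => List.replicate n (0 : Int))) [] (by omega), List.getElem_map]
    simp [List.getD_eq_getElem?_getD, List.getElem?_replicate]
    split <;> simp
  · rw [List.getD_eq_default ((PySem.List.pyRange 0 (n : Int) 1).map
      (fun _ => List.replicate n (0 : Int))) [] (by omega)]
    simp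

-- entry-wise equal n × n matrices are equal
theorem pvE_ext (n : Nat) (m m' : List (List Int)) (hm : pvShape n m) (hm' : pvShape n m')
    (h : ∀ i j, i < n → j < n → pvE m i j = pvE m' i j) : m = m' := by
  obtain ⟨hl, hr⟩ := hm
  obtain ⟨hl', hr'⟩ := hm'
  apply List.ext_getElem (by omega)
  intro i hi hi'
  have hin : i < n := by omega
  have hrow : m[i].length = n := hr _ (m.getElem_mem hi)
  have hrow' : m'[i].length = n := hr' _ (m'.getElem_mem hi')
  apply List.ext_getElem (by omega)
  intro j hj hj'
  have hjn : j < n := by omega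
  have hent := h i j hin hjn
  unfold pvE at hent
  rwa [List.getD_eq_getElem m [] hi, List.getD_eq_getElem m' [] hi',
    List.getD_eq_getElem m[i] 0 hj, List.getD_eq_getElem m'[i] 0 hj'] at hent

-- ===== VERDICT (by name: the statement is the Claim_ definition above) =====
theorem build_connection_matrix_spec : Claim_equal_build_connection_matrix := by
  intro agents configs _ hpre
  obtain ⟨hag, hcfg⟩ := hpre
  unfold Spec_build_connection_matrix
  unfold build_connection_matrix
  simp only []
  obtain ⟨hshA, hentA⟩ := pvOuter_fold agents hag configs _ (pvInit_shape agents.length)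
  apply pvE_ext agents.length _ _ hshA (pvAlt_shape agents configs)
  intro i j hi hj
  rw [hentA i j hi hj, pvInit_entry, pvAlt_entry agents hag configs i j hi hj]
  rcases hg : (PySem.Dict.mk configs).get? agents[i] with _ | cfg
  · have hnone := pvConfigs_get_none configs agents[i] hg
    have : ¬ ∃ p ∈ configs, p.1 = agents[i] ∧ agents[j] ∈ pvCombined p.2 := by
      rintro ⟨p, hp, hpe, _⟩
      exact hnone p hp hpe
    simp [this]
  · by_cases hmem : agents[j] ∈ pvCombined cfg
    · have : ∃ p ∈ configs, p.1 = agents[i] ∧ agents[j] ∈ pvCombined p.2 := by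
        refine ⟨(agents[i], cfg), ?_, rfl, hmem⟩
        have := PySem.Dict.mem_items_of_get?_eq_some _ hg
        simpa using this
      simp [this, hmem]
    · have : ¬ ∃ p ∈ configs, p.1 = agents[i] ∧ agents[j] ∈ pvCombined p.2 := by
        rintro ⟨p, hp, hpe, hmm⟩
        exact hmem ((pvConfigs_get_some configs hcfg agents[i] cfg hg p hp hpe) ▸ hmm)
      simp [this, hmem]
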